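-- pv_equiv track=rewrite | github.com/Xiaolinger-Z/Epitome | dataset_generation/vote_split_func_name/unsupervised_learning/token.py | tokenize_detaching_head
-- ===== SOURCE A (Python) =====
-- def tokenize_detaching_head(text,chars="'\"{[("):
--     tokens = []
--     for head in range(len(text)):
--         found = chars.find(text[head])
--         if found >= 0:
--             tokens.append(chars[found])
--         else:
--             return tokens, text[head:]
--     return tokens, None
-- ===== SOURCE B (Python) =====
-- def tokenize_detaching_head(text, chars="'\"{[("):
--     rest = text.lstrip(chars)
--     tokens = list(text[:len(text) - len(rest)])
--     return tokens, (rest if rest else None)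
-- ===== Notes on version B (the rewrite author's own statement) =====
-- stated objective: idiomatic
-- what changed: Replaces the explicit index loop with chars.find and early return by a single str.lstrip call locating the split point, then slicing off the consumed prefix.
import Mathlib
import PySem

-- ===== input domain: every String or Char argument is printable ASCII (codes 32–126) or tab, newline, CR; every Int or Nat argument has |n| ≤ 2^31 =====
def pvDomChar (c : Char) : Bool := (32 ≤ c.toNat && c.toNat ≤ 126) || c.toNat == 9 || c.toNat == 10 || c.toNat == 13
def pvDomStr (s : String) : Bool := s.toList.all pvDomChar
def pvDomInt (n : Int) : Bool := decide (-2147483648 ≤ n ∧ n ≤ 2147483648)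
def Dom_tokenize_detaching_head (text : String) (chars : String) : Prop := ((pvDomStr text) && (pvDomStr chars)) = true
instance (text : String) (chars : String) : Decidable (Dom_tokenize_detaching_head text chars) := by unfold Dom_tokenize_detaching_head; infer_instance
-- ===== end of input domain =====

-- B replaces A's explicit scan-and-early-return loop with a single lstrip + slice (idiomatic).


-- ===== PORT A =====
-- the for-loop over head: at each position, found = chars.find(text[head]); append chars[found] or return
def tokenize_detaching_head_loop (chars : List Char) : List Char → List String → List String × Option String
  | [], tokens => (tokens, none)
  | c :: rest, tokens =>
    let found := PySem.Chars.find chars [c]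
    if 0 ≤ found then
      -- chars[found]: found is a valid index here, so the default never fires
      tokenize_detaching_head_loop chars rest (tokens ++ [String.ofList ((PySem.List.pyGet? chars found).getD c |> fun x => [x])])
    else (tokens, some (String.ofList (c :: rest)))

def tokenize_detaching_head (text : String) (chars : String) : List String × Option String :=
  tokenize_detaching_head_loop chars.toList text.toList []

-- ===== PORT B =====
def tokenize_detaching_head_alt (text : String) (chars : String) : List String × Option String :=
  -- text.lstrip(chars): ported by hand as dropWhile of membership in chars — exact
  -- (Python's lstrip with an explicit chars argument drops exactly the leading run of
  -- characters contained in chars; lstrip('') drops nothing, as does dropWhile here)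
  let rest := String.ofList (text.toList.dropWhile (fun c => chars.toList.contains c))
  -- list(text[:len(text)-len(rest)])
  let tokens := (text.toList.take (text.toList.length - rest.toList.length)).map (fun c => String.ofList [c])
  (tokens, if rest = "" then none else some rest)

-- ===== PRECONDITION & SPEC =====
def Spec_tokenize_detaching_head (text : String) (chars : String) (out : List String × Option String) : Prop := out = tokenize_detaching_head_alt text chars
instance (text : String) (chars : String) (out : List String × Option String) : Decidable (Spec_tokenize_detaching_head text chars out) := by unfold Spec_tokenize_detaching_head; infer_instance

-- ===== CLAIM (what is proved, stated in full; the proofs are below) =====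
def Claim_equal_tokenize_detaching_head : Prop := ∀ (text : String) (chars : String), Dom_tokenize_detaching_head text chars → Spec_tokenize_detaching_head text chars (tokenize_detaching_head text chars)

-- ===== LEMMAS AND PROOFS =====

-- find of a singleton is nonnegative iff the char is a member
theorem find_singleton_nonneg_iff (chars : List Char) (c : Char) :
    0 ≤ PySem.Chars.find chars [c] ↔ c ∈ chars := by
  rw [PySem.Chars.find_nonneg_iff]
  constructor
  · intro h; exact h.mem (by simp)
  · intro h
    obtain ⟨l, r, rfl⟩ := List.append_of_mem h
    exact ⟨l, r, by simp⟩

-- chars[chars.find([c])] = c when c ∈ chars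
theorem pyGet_find_singleton (chars : List Char) (c : Char) (h : c ∈ chars) :
    (PySem.List.pyGet? chars (PySem.Chars.find chars [c])).getD c = c := by
  have hnn : 0 ≤ PySem.Chars.find chars [c] := (find_singleton_nonneg_iff chars c).2 h
  obtain ⟨hp, -⟩ := PySem.Chars.find_spec hnn
  obtain ⟨t, ht⟩ := hp
  have hlt : (PySem.Chars.find chars [c]).toNat < chars.length := by
    by_contra hge
    rw [List.drop_eq_nil_of_le (by omega)] at ht
    simp at ht
  have h2 : chars[(PySem.Chars.find chars [c]).toNat]? = some c := by
    have := congrArg (fun l => l[0]?) ht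
    simpa [List.getElem?_drop] using this.symm
  have hlt' : PySem.Chars.find chars [c] < (chars.length : Int) := by omega
  rw [List.getElem?_eq_getElem hlt] at h2
  simp [PySem.List.pyGet?, PySem.List.pyIdx?, hnn, hlt', Option.some.inj h2]

-- the loop's closed form
theorem loop_eq (chars : List Char) (cs : List Char) (tokens : List String) :
    tokenize_detaching_head_loop chars cs tokens =
      (tokens ++ (cs.takeWhile (fun c => chars.contains c)).map (fun c => String.ofList [c]),
       if cs.dropWhile (fun c => chars.contains c) = [] then none
       else some (String.ofList (cs.dropWhile (fun c => chars.contains c)))) := by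
  induction cs generalizing tokens with
  | nil => simp [tokenize_detaching_head_loop]
  | cons c rest ih =>
    by_cases hc : c ∈ chars
    · have hnn : 0 ≤ PySem.Chars.find chars [c] := (find_singleton_nonneg_iff chars c).2 hc
      rw [tokenize_detaching_head_loop]
      simp only [hnn, if_pos, pyGet_find_singleton chars c hc, ih,
        List.takeWhile_cons, List.dropWhile_cons]
      simp [hc]
    · have hnn : ¬ 0 ≤ PySem.Chars.find chars [c] := by
        rw [find_singleton_nonneg_iff]; exact hc
      rw [tokenize_detaching_head_loop]
      simp only [hnn, List.takeWhile_cons, List.dropWhile_cons]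
      simp [hc]

-- taking (length - length after dropWhile) is takeWhile
theorem take_len_takeWhile (p : Char → Bool) (l : List Char) :
    l.take (l.length - (l.dropWhile p).length) = l.takeWhile p := by
  have h : l.length - (l.dropWhile p).length = (l.takeWhile p).length := by
    have := congrArg List.length (List.takeWhile_append_dropWhile (p := p) (l := l))
    simp only [List.length_append] at this
    omega
  calc l.take (l.length - (l.dropWhile p).length)
      = ((l.takeWhile p ++ l.dropWhile p)).take (l.takeWhile p).length := by
        rw [h, List.takeWhile_append_dropWhile]
    _ = l.takeWhile p := List.take_left

-- ===== VERDICT (by name: the statement is the Claim_ definition above) =====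
theorem tokenize_detaching_head_spec : Claim_equal_tokenize_detaching_head := by
  intro text chars _
  unfold Spec_tokenize_detaching_head tokenize_detaching_head tokenize_detaching_head_alt
  rw [loop_eq]
  simp only [List.nil_append, String.toList_ofList]
  rw [take_len_takeWhile]
  have he : ∀ d : List Char, (String.ofList d = "") = (d = []) := by
    intro d; rw [eq_iff_iff, String.ext_iff]; simp
  simp only [he]
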